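-- pv_equiv track=rewrite | github.com/pyrocko/pyrocko | src/squirrel/operators/base.py | scodes
-- ===== SOURCE A (Python) =====
-- def scodes(codes):
--     css = list(zip(*codes))
--     if sum(not all(c == cs[0] for c in cs) for cs in css) == 1:
--         return '.'.join(
--             cs[0] if all(c == cs[0] for c in cs) else '(%s)' % ','.join(cs)
--             for cs in css)
--     else:
--         return ', '.join(str(c) for c in codes)
-- ===== SOURCE B (Python) =====
-- def scodes(codes):
--     varying = set()
--     width = 0
--     first = None
--     for row in codes:
--         if first is None:
--             first = row
--             width = len(row)
--         else:
--             if len(row) < width: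
--                 width = len(row)
--                 varying = {i for i in varying if i < width}
--             for i in range(width):
--                 if row[i] != first[i]:
--                     varying.add(i)
--     if len(varying) == 1:
--         (j,) = varying
--         parts = (list(first[:j])
--                  + ['(%s)' % ','.join(row[j] for row in codes)]
--                  + list(first[j + 1:width]))
--         return '.'.join(parts)
--     return ', '.join(str(c) for c in codes)
-- ===== Notes on version B (the rewrite author's own statement) =====
-- stated objective: alternative
-- what changed: B never transposes: it makes one streaming pass over the rows, maintaining a set of varying column indices and a shrinking width (truncating the set when a shorter row arrives), then, if the set is a singleton {j}, rebuilds the compact form by slicing the first row around column j, instead of materialising zip(*codes) and scanning every column tuple twice.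
import Mathlib
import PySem

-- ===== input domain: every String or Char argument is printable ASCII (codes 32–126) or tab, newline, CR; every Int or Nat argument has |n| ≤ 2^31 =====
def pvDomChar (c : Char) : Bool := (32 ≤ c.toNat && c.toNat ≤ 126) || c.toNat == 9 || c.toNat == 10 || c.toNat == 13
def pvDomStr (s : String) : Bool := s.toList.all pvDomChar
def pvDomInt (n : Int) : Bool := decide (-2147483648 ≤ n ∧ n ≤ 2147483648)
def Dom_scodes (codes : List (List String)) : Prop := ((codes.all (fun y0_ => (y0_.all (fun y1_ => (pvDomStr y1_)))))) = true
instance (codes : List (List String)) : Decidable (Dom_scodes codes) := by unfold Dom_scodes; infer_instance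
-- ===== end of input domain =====

-- B replaces A's transpose-and-scan-columns by a single streaming pass over the rows that
-- maintains a set of varying column indices and a shrinking width, then slices the first
-- row around the unique varying column (objective: alternative, same cost).

-- Shared model of Python's str()/repr() on a str and on a tuple of str
-- (exact on the domain: printable ASCII plus tab/newline/CR).
def pyReprStr (s : String) : String :=
  let cs := s.toList
  let q : Char := if cs.contains '\'' && !(cs.contains '"') then '"' else '\''
  String.mk ((q :: cs.flatMap (fun c =>
      if c = '\\' then ['\\', '\\']
      else if c = q then ['\\', q]
      else if c = '\t' then ['\\', 't']
      else if c = '\n' then ['\\', 'n']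
      else if c = '\r' then ['\\', 'r']
      else [c])) ++ [q])

def pyStrStrList (l : List String) : String :=
  match l with
  | [x] => "(" ++ pyReprStr x ++ ",)"
  | _ => "(" ++ PySem.Str.join ", " (l.map pyReprStr) ++ ")"

-- ===== PORT A =====
-- zip(*codes): columns until the shortest row is exhausted; zip() (codes = []) is [].
def pyZipStar : List (List String) → List (List String)
  | [] => []
  | r :: rs =>
    if r.isEmpty || rs.any (·.isEmpty) then []
    else (r.headD "" :: rs.map (fun x => x.headD "")) ::
         pyZipStar (r.tail :: rs.map (·.tail))
termination_by l => (l.headD []).length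
decreasing_by
  simp_all [List.isEmpty_eq_false_iff]
  cases r <;> simp_all

def scodes (codes : List (List String)) : String :=
  let css := pyZipStar codes
  if (css.map (fun cs => if cs.all (fun c => c == cs.headD "") then (0 : Nat) else 1)).sum == 1 then
    PySem.Str.join "." (css.map (fun cs =>
      if cs.all (fun c => c == cs.headD "") then cs.headD ""
      else "(" ++ PySem.Str.join "," cs ++ ")"))
  else
    PySem.Str.join ", " (codes.map pyStrStrList)

-- ===== PORT B =====
-- the for-loop of Source B after the first row (first fixed): state = (width, varying);
-- row[i] is row.getD i "" (safe: i < width ≤ len(row)); the set comprehension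
-- '{i for i in varying if i < width}' is the filter; set.add is PySem.Set.add.
def bLoop (first : List String) : List (List String) → Nat → PySem.Set Nat → Nat × PySem.Set Nat
  | [], width, varying => (width, varying)
  | row :: rs, width, varying =>
    let width' := if row.length < width then row.length else width
    let varying' := if row.length < width then varying.filter (fun i => decide (i < width')) else varying
    let varying'' := (List.range width').foldl
        (fun v i => if !(row.getD i "" == first.getD i "") then PySem.Set.add v i else v) varying'
    bLoop first rs width' varying''

def scodes_alt (codes : List (List String)) : String :=
  match codes with
  | [] => PySem.Str.join ", " (codes.map pyStrStrList)   -- len(varying)==0, fallback ('')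
  | first :: rest =>
    let wv := bLoop first rest first.length PySem.Set.empty
    match wv.2 with
    | [j] =>
      -- first[:j] = take j, first[j+1:width] = (take width).drop (j+1) (PySem.List.slice_natCast)
      PySem.Str.join "."
        (first.take j
          ++ ["(" ++ PySem.Str.join "," (codes.map (fun row => row.getD j "")) ++ ")"]
          ++ (first.take wv.1).drop (j + 1))
    | _ => PySem.Str.join ", " (codes.map pyStrStrList)

-- ===== PRECONDITION & SPEC =====
def Spec_scodes (codes : List (List String)) (out : String) : Prop := out = scodes_alt codes
instance (codes : List (List String)) (out : String) : Decidable (Spec_scodes codes out) := by unfold Spec_scodes; infer_instance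

-- ===== CLAIM (what is proved, stated in full; the proofs are below) =====
def Claim_equal_scodes : Prop := ∀ (codes : List (List String)), Dom_scodes codes → Spec_scodes codes (scodes codes)

-- ===== LEMMAS AND PROOFS =====

def minLen : List (List String) → Nat
  | [] => 0
  | [r] => r.length
  | r :: s :: rs => min r.length (minLen (s :: rs))

theorem minLen_cons (r : List String) (rs : List (List String)) :
    minLen (r :: rs) = if rs.isEmpty then r.length else min r.length (minLen rs) := by
  cases rs <;> rfl

theorem minLen_zero_of_mem' (codes : List (List String)) (h : [] ∈ codes) :
    minLen codes = 0 := by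
  induction codes with
  | nil => simp at h
  | cons r rs ih =>
    rw [minLen_cons]
    rcases List.mem_cons.mp h with h1 | h1
    · subst h1; cases rs <;> simp
    · have hne : rs ≠ [] := List.ne_nil_of_mem h1
      simp [List.isEmpty_iff, hne, ih h1]

theorem minLen_pos (codes : List (List String)) (h : codes ≠ [])
    (hne : ∀ row ∈ codes, row ≠ []) : 1 ≤ minLen codes := by
  induction codes with
  | nil => simp at h
  | cons r rs ih =>
    have hr : r ≠ [] := hne r (by simp)
    have hr' : 1 ≤ r.length := List.length_pos_iff.mpr hr
    rw [minLen_cons]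
    cases rs with
    | nil => simpa using hr'
    | cons s rs' =>
      have := ih (by simp) (fun row hm => hne row (by simp [hm]))
      simp only [List.isEmpty_cons, if_neg Bool.false_ne_true]
      omega

theorem minLen_map_tail (codes : List (List String))
    (hne : ∀ row ∈ codes, row ≠ []) :
    minLen (codes.map (·.tail)) = minLen codes - 1 := by
  induction codes with
  | nil => simp [minLen]
  | cons r rs ih =>
    have hr : 1 ≤ r.length := List.length_pos_iff.mpr (hne r (by simp))
    cases rs with
    | nil => simp [minLen]
    | cons s rs' =>
      have hrec := ih (fun row hm => hne row (by simp [hm]))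
      simp only [List.map_cons, minLen, List.length_tail] at *
      omega

theorem zipStar_cons (r : List String) (rs : List (List String)) :
    pyZipStar (r :: rs) =
      (List.range (minLen (r :: rs))).map
        (fun i => (r :: rs).map (fun row => row.getD i "")) := by
  induction r generalizing rs with
  | nil =>
    rw [pyZipStar]
    have : minLen ([] :: rs) = 0 := minLen_zero_of_mem' _ (by simp)
    simp [this]
  | cons a t ih =>
    rw [pyZipStar]
    by_cases hemp : rs.any (·.isEmpty) = true
    · rw [if_pos (by simp [hemp])]
      obtain ⟨row, hm, hrow⟩ := List.any_eq_true.mp hemp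
      have hrow' : row = [] := by simpa [List.isEmpty_iff] using hrow
      subst hrow'
      have : minLen ((a :: t) :: rs) = 0 := minLen_zero_of_mem' _ (by simp [hm])
      simp [this]
    · rw [if_neg (by simp [hemp])]
      have hne : ∀ row ∈ ((a :: t) :: rs), row ≠ [] := by
        intro row hmem
        rcases List.mem_cons.mp hmem with h1 | h1
        · subst h1; simp
        · intro hc; subst hc
          exact hemp (List.any_eq_true.mpr ⟨[], h1, by simp⟩)
      have hpos : 1 ≤ minLen ((a :: t) :: rs) := minLen_pos _ (by simp) hne
      have htail : minLen (t :: rs.map (·.tail)) = minLen ((a :: t) :: rs) - 1 := by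
        have := minLen_map_tail ((a :: t) :: rs) hne
        simpa using this
      obtain ⟨k, hk⟩ : ∃ k, minLen ((a :: t) :: rs) = k + 1 :=
        ⟨minLen ((a :: t) :: rs) - 1, by omega⟩
      simp only [List.tail_cons, List.headD_cons]
      rw [ih (rs.map (·.tail)), htail, hk]
      simp only [Nat.add_sub_cancel, List.range_succ_eq_map, List.map_cons, List.map_map]
      congr 1
      · simp only [List.getD_cons_zero, List.cons.injEq, true_and]
        apply List.map_congr_left
        intro row hmem
        have hr : row ≠ [] := hne row (by simp [hmem])
        cases row <;> simp_all
      · apply List.map_congr_left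
        intro i _
        simp only [Function.comp_apply, List.getD_cons_succ, List.cons.injEq, true_and]
        apply List.map_congr_left
        intro row hmem
        have hr : row ≠ [] := hne row (by simp [hmem])
        cases row <;> simp_all

theorem sum_map_ite {α : Type} (l : List α) (p : α → Bool) :
    (l.map (fun x => if p x then (0 : Nat) else 1)).sum = (l.filter (fun x => !p x)).length := by
  induction l with
  | nil => simp
  | cons a t ih => by_cases h : p a <;> simp [h, ih] <;> omega

theorem allEq_col (r0 : List String) (rs : List (List String)) (i : Nat) :
    (((r0 :: rs).map (fun row => row.getD i "")).all
      (fun c => c == ((r0 :: rs).map (fun row => row.getD i "")).headD "")) =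
    !((r0 :: rs).any (fun row => !(row.getD i "" == r0.getD i ""))) := by
  simp [List.any_map, List.all_eq_not_any_not, Function.comp_def]

-- ===== B-side lemmas =====

theorem bLoop_fst (first : List String) :
    ∀ (rs : List (List String)) (w : Nat) (v : PySem.Set Nat),
    (bLoop first rs w v).1 = rs.foldl (fun a r => min a r.length) w := by
  intro rs
  induction rs with
  | nil => intro w v; rfl
  | cons row t ih =>
    intro w v
    rw [bLoop]
    simp only [List.foldl_cons]
    rw [ih]
    congr 1
    split <;> omega

theorem foldl_min_minLen :
    ∀ (rs : List (List String)) (w : Nat),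
    rs.foldl (fun a r => min a r.length) w = if rs.isEmpty then w else min w (minLen rs) := by
  intro rs
  induction rs with
  | nil => intro w; rfl
  | cons row t ih =>
    intro w
    simp only [List.foldl_cons, ih, minLen_cons, List.isEmpty_cons]
    cases t <;> simp <;> omega

theorem bLoop_fst_minLen (r0 : List String) (rs : List (List String)) (v : PySem.Set Nat) :
    (bLoop r0 rs r0.length v).1 = minLen (r0 :: rs) := by
  rw [bLoop_fst, foldl_min_minLen, minLen_cons]

theorem mem_foldl_add (c : Nat → Bool) :
    ∀ (l : List Nat) (v : List Nat) (i : Nat),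
    (i ∈ l.foldl (fun v k => if c k then PySem.Set.add v k else v) v) ↔
      (i ∈ v ∨ (i ∈ l ∧ c i = true)) := by
  intro l
  induction l with
  | nil => simp
  | cons a t ih =>
    intro v i
    simp only [List.foldl_cons]
    by_cases hca : c a = true
    · rw [if_pos hca, ih]
      simp only [PySem.Set.mem_add, List.mem_cons]
      constructor
      · rintro ((h | h) | ⟨ht, hc⟩)
        · exact Or.inl h
        · exact Or.inr ⟨Or.inl h, h ▸ hca⟩
        · exact Or.inr ⟨Or.inr ht, hc⟩
      · rintro (h | ⟨(h | h), hc⟩)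
        · exact Or.inl (Or.inl h)
        · subst h; exact Or.inl (Or.inr rfl)
        · exact Or.inr ⟨h, hc⟩
    · rw [if_neg hca, ih]
      simp only [List.mem_cons]
      constructor
      · rintro (h | ⟨ht, hc⟩)
        · exact Or.inl h
        · exact Or.inr ⟨Or.inr ht, hc⟩
      · rintro (h | ⟨(h | h), hc⟩)
        · exact Or.inl h
        · subst h; exact absurd hc hca
        · exact Or.inr ⟨h, hc⟩

theorem nodup_foldl_add (c : Nat → Bool) :
    ∀ (l : List Nat) (v : List Nat), v.Nodup →
    (l.foldl (fun v k => if c k then PySem.Set.add v k else v) v).Nodup := by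
  intro l
  induction l with
  | nil => intro v hv; exact hv
  | cons a t ih =>
    intro v hv
    simp only [List.foldl_cons]
    apply ih
    split
    · exact PySem.Set.nodup_add _ _ hv
    · exact hv

theorem bLoop_nodup (first : List String) :
    ∀ (rs : List (List String)) (w : Nat) (v : PySem.Set Nat), v.Nodup →
    (bLoop first rs w v).2.Nodup := by
  intro rs
  induction rs with
  | nil => intro w v hv; exact hv
  | cons row t ih =>
    intro w v hv
    rw [bLoop]
    apply ih
    apply nodup_foldl_add
    split
    · exact hv.filter _
    · exact hv

theorem bLoop_mem (first : List String) :
    ∀ (rs : List (List String)) (w : Nat) (v : PySem.Set Nat) (Q : Nat → Prop),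
    (∀ i, i ∈ v ↔ (i < w ∧ Q i)) →
    ∀ i, i ∈ (bLoop first rs w v).2 ↔
      (i < (bLoop first rs w v).1 ∧
        (Q i ∨ ∃ row ∈ rs, (row.getD i "" == first.getD i "") = false)) := by
  intro rs
  induction rs with
  | nil =>
    intro w v Q hv i
    simpa [bLoop] using hv i
  | cons row t ih =>
    intro w v Q hv i
    rw [bLoop]
    have key : ∀ i, i ∈ ((List.range (if row.length < w then row.length else w)).foldl
        (fun v i => if !(row.getD i "" == first.getD i "") then PySem.Set.add v i else v)
        (if row.length < w then v.filter (fun i => decide (i < if row.length < w then row.length else w)) else v)) ↔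
        (i < (if row.length < w then row.length else w) ∧
          (Q i ∨ (row.getD i "" == first.getD i "") = false)) := by
      intro k
      rw [mem_foldl_add]
      by_cases hs : row.length < w
      · simp only [if_pos hs, List.mem_filter, List.mem_range, hv k, decide_eq_true_eq]
        constructor
        · rintro (⟨⟨hkw, hq⟩, hlt⟩ | ⟨hlt, hc⟩)
          · exact ⟨hlt, Or.inl hq⟩
          · exact ⟨hlt, Or.inr (by simpa using hc)⟩
        · rintro ⟨hlt, hq | hd⟩
          · exact Or.inl ⟨⟨by omega, hq⟩, hlt⟩
          · exact Or.inr ⟨hlt, by simpa using hd⟩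
      · simp only [if_neg hs, List.mem_range, hv k]
        constructor
        · rintro (⟨hkw, hq⟩ | ⟨hlt, hc⟩)
          · exact ⟨hkw, Or.inl hq⟩
          · exact ⟨hlt, Or.inr (by simpa using hc)⟩
        · rintro ⟨hlt, hq | hd⟩
          · exact Or.inl ⟨hlt, hq⟩
          · exact Or.inr ⟨hlt, by simpa using hd⟩
    rw [ih _ _ (fun k => Q k ∨ (row.getD k "" == first.getD k "") = false) key i]
    constructor
    · rintro ⟨hlt, (hq | hd) | ⟨r, hr, hdr⟩⟩
      · exact ⟨hlt, Or.inl hq⟩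
      · exact ⟨hlt, Or.inr ⟨row, by simp, hd⟩⟩
      · exact ⟨hlt, Or.inr ⟨r, by simp [hr], hdr⟩⟩
    · rintro ⟨hlt, hq | ⟨r, hr, hdr⟩⟩
      · exact ⟨hlt, Or.inl (Or.inl hq)⟩
      · rcases List.mem_cons.mp hr with h1 | h1
        · subst h1; exact ⟨hlt, Or.inl (Or.inr hdr)⟩
        · exact ⟨hlt, Or.inr ⟨r, h1, hdr⟩⟩

theorem take_eq_range_map (l : List String) (n : Nat) (hn : n ≤ l.length) :
    l.take n = (List.range n).map (fun i => l.getD i "") := by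
  apply List.ext_getElem
  · simp; omega
  · intro i h1 h2
    simp only [List.getElem_take, List.getElem_map, List.getElem_range]
    rw [List.getD_eq_getElem l "" (by simp at h1; omega)]

-- the compact output list: columns of the first row split around column j
theorem range_map_split (r0 : List String) (paren : String) (m j : Nat)
    (hj : j < m) (hm : m ≤ r0.length) :
    (List.range m).map (fun i => if i = j then paren else r0.getD i "") =
      r0.take j ++ [paren] ++ (r0.take m).drop (j + 1) := by
  have hsplit : m = (j + 1) + (m - (j + 1)) := by omega
  have hr : List.range m
      = List.range (j + 1) ++ (List.range (m - (j + 1))).map (fun x => (j + 1) + x) := by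
    conv_lhs => rw [hsplit]
    exact List.range_add
  rw [take_eq_range_map r0 j (by omega), take_eq_range_map r0 m hm]
  rw [hr, List.map_append, List.map_append]
  have hdrop : ∀ (B : List String),
      ((List.range (j + 1)).map (fun i => r0.getD i "") ++ B).drop (j + 1) = B := by
    intro B
    have h := List.drop_left (l₁ := (List.range (j + 1)).map (fun i => r0.getD i "")) (l₂ := B)
    simpa using h
  rw [hdrop]
  rw [List.range_succ, List.map_append]
  simp only [List.map_map, List.map_cons, List.map_nil]
  rw [List.map_congr_left (l := List.range j)
        (f := fun i => if i = j then paren else r0.getD i "")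
        (g := fun i => r0.getD i "")
        (fun i hi => if_neg (by have := List.mem_range.mp hi; omega))]
  rw [List.map_congr_left
        (f := (fun i => if i = j then paren else r0.getD i "") ∘ (fun x => (j + 1) + x))
        (g := (fun i => r0.getD i "") ∘ (fun x => (j + 1) + x))
        (fun i hi => by simp only [Function.comp_apply]; exact if_neg (by omega))]
  simp [List.append_assoc]

-- minLen is at most the first row's length
theorem minLen_le_head (r0 : List String) (rs : List (List String)) :
    minLen (r0 :: rs) ≤ r0.length := by
  rw [minLen_cons]
  split <;> omega

-- ===== the main equivalence =====
theorem scodes_eq_alt (codes : List (List String)) : scodes codes = scodes_alt codes := by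
  cases codes with
  | nil =>
    have hz : pyZipStar [] = [] := by rw [pyZipStar]
    rw [scodes, scodes_alt]
    simp [hz, PySem.Str.join]
  | cons r0 rs =>
    rw [scodes]
    simp only [zipStar_cons, List.map_map]
    set m := minLen (r0 :: rs) with hm
    set P : Nat → Bool :=
      fun i => rs.any (fun row => !(row.getD i "" == r0.getD i "")) with hP
    have hcol : ∀ i,
        (((r0 :: rs).map (fun row => row.getD i "")).all
          (fun c => c == ((r0 :: rs).map (fun row => row.getD i "")).headD "")) = !P i := by
      intro i
      rw [allEq_col]
      simp [hP, List.any_cons]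
    have hsum :
        ((List.range m).map ((fun cs => if cs.all (fun c => c == cs.headD "") then (0 : Nat) else 1) ∘
          (fun i => (r0 :: rs).map (fun row => row.getD i "")))).sum
        = ((List.range m).filter P).length := by
      rw [List.map_congr_left
            (g := fun i => if (fun k => !P k) i = true then (0 : Nat) else 1)
            (fun i _ => by simp only [Function.comp_apply, hcol i])]
      rw [sum_map_ite (List.range m) (fun k => !P k)]
      simp
    rw [hsum]
    -- B side
    have halt : scodes_alt (r0 :: rs) =
        (match (bLoop r0 rs r0.length PySem.Set.empty).2 with
          | [j] =>
            PySem.Str.join "."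
              (r0.take j
                ++ ["(" ++ PySem.Str.join "," ((r0 :: rs).map (fun row => row.getD j "")) ++ ")"]
                ++ (r0.take (bLoop r0 rs r0.length PySem.Set.empty).1).drop (j + 1))
          | _ => PySem.Str.join ", " ((r0 :: rs).map pyStrStrList)) := rfl
    rw [halt]
    have hw1 : (bLoop r0 rs r0.length PySem.Set.empty).1 = m := bLoop_fst_minLen r0 rs _
    have hnodv : (bLoop r0 rs r0.length PySem.Set.empty).2.Nodup :=
      bLoop_nodup r0 rs _ _ List.nodup_nil
    have hmemv : ∀ i, i ∈ (bLoop r0 rs r0.length PySem.Set.empty).2 ↔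
        i ∈ (List.range m).filter P := by
      intro i
      rw [bLoop_mem r0 rs r0.length PySem.Set.empty (fun _ => False)
            (by intro k; rw [show (PySem.Set.empty : PySem.Set Nat) = [] from rfl]; simp) i]
      rw [hw1]
      simp only [false_or, List.mem_filter, List.mem_range]
      constructor
      · rintro ⟨hlt, row, hrow, hd⟩
        refine ⟨hlt, ?_⟩
        simp only [hP]
        exact List.any_eq_true.mpr ⟨row, hrow, by rw [hd]; rfl⟩
      · rintro ⟨hlt, hany⟩
        simp only [hP] at hany
        obtain ⟨row, hrow, hd⟩ := List.any_eq_true.mp hany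
        refine ⟨hlt, row, hrow, ?_⟩
        simp only [Bool.not_eq_true'] at hd
        exact hd
    have hperm : (bLoop r0 rs r0.length PySem.Set.empty).2.Perm ((List.range m).filter P) :=
      (List.perm_ext_iff_of_nodup hnodv ((List.nodup_range).filter P)).mpr hmemv
    cases hv2 : (bLoop r0 rs r0.length PySem.Set.empty).2 with
    | nil =>
      rw [hv2] at hperm
      have hf : (List.range m).filter P = [] := hperm.symm.eq_nil
      rw [hf]
      simp
    | cons j tail =>
      cases tail with
      | nil =>
        rw [hv2] at hperm
        have hf : (List.range m).filter P = [j] :=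
          List.perm_singleton.mp hperm.symm
        rw [hf]
        simp only [List.length_cons, List.length_nil, Nat.zero_add]
        rw [if_pos (by simp)]
        have hjm : j ∈ (List.range m).filter P := by rw [hf]; simp
        have hjlt : j < m := List.mem_range.mp (List.mem_filter.mp hjm).1
        have hPj : P j = true := (List.mem_filter.mp hjm).2
        have hPiff : ∀ i, i < m → (P i = true ↔ i = j) := by
          intro i hi
          constructor
          · intro hpi
            have : i ∈ (List.range m).filter P :=
              List.mem_filter.mpr ⟨List.mem_range.mpr hi, hpi⟩
            rw [hf] at this
            simpa using this
          · intro h; subst h; exact hPj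
        rw [hw1]
        rw [List.map_congr_left (l := List.range m)
              (g := fun i => if i = j then
                  "(" ++ PySem.Str.join "," ((r0 :: rs).map (fun row => row.getD j "")) ++ ")"
                else r0.getD i "")
              (fun i hi => by
                have him : i < m := List.mem_range.mp hi
                simp only [Function.comp_apply, hcol i]
                by_cases hij : i = j
                · subst hij
                  rw [hPj]
                  simp
                · have : P i = false := by
                    cases h : P i
                    · rfl
                    · exact absurd ((hPiff i him).mp h) hij
                  rw [this]
                  simp [hij])]
        rw [range_map_split r0 _ m j hjlt (minLen_le_head r0 rs)]
      | cons j2 tail2 =>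
        rw [hv2] at hperm
        have : ((List.range m).filter P).length = tail2.length + 2 := by
          have := hperm.length_eq
          simp at this
          omega
        rw [if_neg (by rw [this]; simp)]

-- ===== VERDICT (by name: the statement is the Claim_ definition above) =====
theorem scodes_spec : Claim_equal_scodes := by
  intro codes _
  unfold Spec_scodes
  exact scodes_eq_alt codes
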